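-- pv_equiv track=rewrite | github.com/seunghoonlee89/excc | excc/lib/cc/code_gen.py | idx_string
-- ===== SOURCE A (Python) =====
-- def idx_string(ia, aa, ib, ab):
--     na = len(ia)
--     nb = len(ib)
--     ntot = na + nb
--     l_idx = '(' * (2 * ntot - 1)
--     if ntot == 4:
--         l_idx += '(int64_t)'
--     if na > 0:
--         l_idx += ia[0]
--         for it in range(1, na, 1):
--             l_idx += '*nocca+' + ia[it] + ')'
--         for it in range(nb):
--             l_idx += '*noccb+' + ib[it] + ')'
--     else:
--         l_idx += ib[0]
--         for it in range(1, nb, 1):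
--             l_idx += '*noccb+' + ib[it] + ')'
--     for it in range(na):
--         l_idx += '*nvira+' + aa[it] + ')'
--     for it in range(nb):
--         l_idx += '*nvirb+' + ab[it] + ')'
--     return l_idx
-- ===== SOURCE B (Python) =====
-- def idx_string(ia, aa, ib, ab):
--     na = len(ia)
--     nb = len(ib)
--     if na > 0:
--         first = ia[0]
--         pairs = [('nocca', x) for x in ia[1:]] + [('noccb', x) for x in ib]
--     else:
--         first = ib[0]
--         pairs = [('noccb', x) for x in ib[1:]]
--     pairs += [('nvira', x) for x in aa[:na]]
--     pairs += [('nvirb', x) for x in ab[:nb]]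
--     acc = ('(int64_t)' if na + nb == 4 else '') + first
--     for f, x in pairs:
--         acc = '(' + acc + '*' + f + '+' + x + ')'
--     return acc
-- ===== Notes on version B (the rewrite author's own statement) =====
-- stated objective: simpler
-- what changed: B builds the nested expression inside-out: it collects one ordered list of (multiplier, index) pairs and left-folds it with a wrapping step acc -> '('+acc+'*'+f+'+'+x+')', so the parentheses are produced one per step by the fold instead of A's pre-counted '('*(2*ntot-1) prefix followed by four separate appending loops.
import Mathlib
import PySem

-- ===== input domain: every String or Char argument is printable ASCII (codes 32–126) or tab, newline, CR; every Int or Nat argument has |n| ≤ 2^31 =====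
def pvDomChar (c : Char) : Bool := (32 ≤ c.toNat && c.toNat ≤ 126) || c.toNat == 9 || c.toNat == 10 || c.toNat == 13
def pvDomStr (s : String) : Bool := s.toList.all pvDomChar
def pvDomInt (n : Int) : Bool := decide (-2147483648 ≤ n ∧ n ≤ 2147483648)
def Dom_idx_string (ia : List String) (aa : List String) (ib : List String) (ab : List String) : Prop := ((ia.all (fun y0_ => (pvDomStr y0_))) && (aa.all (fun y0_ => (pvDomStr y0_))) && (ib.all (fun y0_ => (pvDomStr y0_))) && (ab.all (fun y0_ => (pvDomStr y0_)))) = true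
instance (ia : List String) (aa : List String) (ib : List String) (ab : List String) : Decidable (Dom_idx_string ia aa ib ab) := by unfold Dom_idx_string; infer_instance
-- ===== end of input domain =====

-- B builds the expression inside-out: one ordered (multiplier, index) pair list is left-folded with a
-- wrapping step acc -> '('+acc+'*'+f+'+'+x+')', instead of A's pre-counted '(' prefix and four append loops
-- (objective: simpler).

-- ===== PORT A =====
-- String concatenation is ported on List Char (String.ofList at the end); xs[i] via PySem pyGet?/pyGetD.
def idx_string (ia : List String) (aa : List String) (ib : List String) (ab : List String) : String :=
  let na : Int := PySem.List.len ia
  let nb : Int := PySem.List.len ib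
  let ntot : Int := na + nb
  let l0 : List Char := List.replicate (2 * ntot - 1).toNat '('
  let l1 : List Char := if ntot = 4 then l0 ++ "(int64_t)".toList else l0
  let l2 : List Char :=
    if 0 < na then
      let s1 := l1 ++ ((PySem.List.pyGet? ia 0).getD "").toList
      let s2 := (PySem.List.pyRange 1 na 1).foldl
        (fun acc it => acc ++ "*nocca+".toList ++ (PySem.List.pyGetD ia it "").toList ++ ")".toList) s1
      (PySem.List.pyRange 0 nb 1).foldl
        (fun acc it => acc ++ "*noccb+".toList ++ (PySem.List.pyGetD ib it "").toList ++ ")".toList) s2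
    else
      let s1 := l1 ++ ((PySem.List.pyGet? ib 0).getD "").toList
      (PySem.List.pyRange 1 nb 1).foldl
        (fun acc it => acc ++ "*noccb+".toList ++ (PySem.List.pyGetD ib it "").toList ++ ")".toList) s1
  let l3 : List Char := (PySem.List.pyRange 0 na 1).foldl
      (fun acc it => acc ++ "*nvira+".toList ++ (PySem.List.pyGetD aa it "").toList ++ ")".toList) l2
  let l4 : List Char := (PySem.List.pyRange 0 nb 1).foldl
      (fun acc it => acc ++ "*nvirb+".toList ++ (PySem.List.pyGetD ab it "").toList ++ ")".toList) l3
  String.ofList l4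

-- ===== PORT B =====
def idx_string_alt (ia : List String) (aa : List String) (ib : List String) (ab : List String) : String :=
  let na : Nat := ia.length
  let nb : Nat := ib.length
  let fp : String × List (String × String) :=
    if 0 < na then
      (((PySem.List.pyGet? ia 0).getD ""),
        (PySem.List.slice ia (some 1) none).map (fun x => ("nocca", x)) ++ ib.map (fun x => ("noccb", x)))
    else
      (((PySem.List.pyGet? ib 0).getD ""),
        (PySem.List.slice ib (some 1) none).map (fun x => ("noccb", x)))
  let pairs : List (String × String) :=
    fp.2 ++ (PySem.List.slice aa none (some (na : Int))).map (fun x => ("nvira", x))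
         ++ (PySem.List.slice ab none (some (nb : Int))).map (fun x => ("nvirb", x))
  let acc0 : List Char := (if na + nb = 4 then "(int64_t)".toList else []) ++ fp.1.toList
  String.ofList (pairs.foldl
    (fun acc fx => "(".toList ++ acc ++ "*".toList ++ fx.1.toList ++ "+".toList ++ fx.2.toList ++ ")".toList)
    acc0)

-- ===== PRECONDITION & SPEC =====
-- Pre_ excludes exactly the inputs where Python A raises IndexError: both index lists empty
-- (ib[0]), or fewer virtual labels than occupied ones (aa[it]/ab[it] out of range).
def Pre_idx_string (ia : List String) (aa : List String) (ib : List String) (ab : List String) : Prop :=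
  (ia ≠ [] ∨ ib ≠ []) ∧ ia.length ≤ aa.length ∧ ib.length ≤ ab.length
instance (ia : List String) (aa : List String) (ib : List String) (ab : List String) : Decidable (Pre_idx_string ia aa ib ab) := by unfold Pre_idx_string; infer_instance
def pvWitness_idx_string : List String × List String × List String × List String := (["i"], ["a"], [], [])

def Spec_idx_string (ia : List String) (aa : List String) (ib : List String) (ab : List String) (out : String) : Prop := out = idx_string_alt ia aa ib ab
instance (ia : List String) (aa : List String) (ib : List String) (ab : List String) (out : String) : Decidable (Spec_idx_string ia aa ib ab out) := by unfold Spec_idx_string; infer_instance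

-- ===== CLAIM (what is proved, stated in full; the proofs are below) =====
def Claim_equal_idx_string : Prop := ∀ (ia : List String) (aa : List String) (ib : List String) (ab : List String), Dom_idx_string ia aa ib ab → Pre_idx_string ia aa ib ab → Spec_idx_string ia aa ib ab (idx_string ia aa ib ab)

-- ===== LEMMAS AND PROOFS =====

lemma pvRepCons {α : Type} (n : Nat) (c : α) (X : List α) :
    List.replicate n c ++ c :: X = c :: (List.replicate n c ++ X) := by
  induction n with
  | zero => simp
  | succ k ih => simp [List.replicate_succ, ih]

-- B's wrapping fold in normal form: parenthesis prefix + body + flattened segments.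
lemma pvWrapFold (l : List (String × String)) (init : List Char) :
    l.foldl
      (fun acc fx => "(".toList ++ acc ++ "*".toList ++ fx.1.toList ++ "+".toList ++ fx.2.toList ++ ")".toList)
      init
    = List.replicate l.length '(' ++ init
      ++ l.flatMap (fun fx => "*".toList ++ fx.1.toList ++ "+".toList ++ fx.2.toList ++ ")".toList) := by
  induction l generalizing init with
  | nil => simp
  | cons p t ih =>
    rw [List.foldl_cons, ih]
    simp only [List.length_cons, List.replicate_succ, List.flatMap_cons, List.cons_append,
      List.append_assoc]
    rw [show "(".toList = ['('] from rfl, List.singleton_append, pvRepCons]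

-- A's loop over range(0, n) reading xs[it], with n ≤ len xs
lemma pvFoldA_take (xs : List String) (n : Nat) (hn : n ≤ xs.length) (m : String) (init : List Char) :
    (PySem.List.pyRange 0 (n : Int) 1).foldl
      (fun acc it => acc ++ m.toList ++ (PySem.List.pyGetD xs it "").toList ++ ")".toList) init
    = init ++ (xs.take n).flatMap (fun x => m.toList ++ x.toList ++ ")".toList) := by
  have hcongr : (PySem.List.pyRange 0 (n : Int) 1).foldl
      (fun acc it => acc ++ m.toList ++ (PySem.List.pyGetD xs it "").toList ++ ")".toList) init
      = (PySem.List.pyRange 0 (n : Int) 1).foldl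
      (fun acc it => acc ++ m.toList ++ (PySem.List.pyGetD (xs.take n) it "").toList ++ ")".toList) init := by
    apply PySem.List.foldl_congr_mem
    intro acc x hx
    rcases (PySem.List.mem_pyRange_one).1 hx with ⟨h0, h1⟩
    have hx1 : x < ((xs.take n).length : Int) := by simp [List.length_take]; omega
    have hx2 : x < (xs.length : Int) := by omega
    rw [PySem.List.pyGetD_eq_getElem _ _ h0 hx1, PySem.List.pyGetD_eq_getElem _ _ h0 hx2]
    rw [List.getElem_take]
  rw [hcongr]
  have hlen : (n : Int) = PySem.List.len (xs.take n) := by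
    simp [List.length_take]; omega
  rw [hlen, PySem.List.foldl_pyRange_pyGetD (xs.take n) ""
    (fun acc x => acc ++ m.toList ++ x.toList ++ ")".toList) init (by omega : (0:Int) ≤ 0)]
  have hfun : (fun (acc : List Char) (x : String) => acc ++ m.toList ++ x.toList ++ ")".toList)
      = fun acc x => acc ++ ((fun y : String => m.toList ++ y.toList ++ ")".toList) x) := by
    funext acc x; simp
  rw [hfun, PySem.List.foldl_append_eq_flatMap]
  simp

-- A's loop over range(1, len xs) reading xs[it]
lemma pvFoldA_drop (xs : List String) (m : String) (init : List Char) :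
    (PySem.List.pyRange 1 ((xs.length : Int)) 1).foldl
      (fun acc it => acc ++ m.toList ++ (PySem.List.pyGetD xs it "").toList ++ ")".toList) init
    = init ++ (xs.drop 1).flatMap (fun x => m.toList ++ x.toList ++ ")".toList) := by
  rw [PySem.List.foldl_pyRange_pyGetD' xs ""
    (fun acc x => acc ++ m.toList ++ x.toList ++ ")".toList) init (by omega : (0:Int) ≤ (1 : Int))]
  have hfun : (fun (acc : List Char) (x : String) => acc ++ m.toList ++ x.toList ++ ")".toList)
      = fun acc x => acc ++ ((fun y : String => m.toList ++ y.toList ++ ")".toList) x) := by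
    funext acc x; simp
  rw [hfun, PySem.List.foldl_append_eq_flatMap]
  simp

lemma pvSeg_nocca (x : String) : "*".toList ++ "nocca".toList ++ "+".toList ++ x.toList ++ ")".toList = "*nocca+".toList ++ x.toList ++ ")".toList := by simp
lemma pvSeg_noccb (x : String) : "*".toList ++ "noccb".toList ++ "+".toList ++ x.toList ++ ")".toList = "*noccb+".toList ++ x.toList ++ ")".toList := by simp
lemma pvSeg_nvira (x : String) : "*".toList ++ "nvira".toList ++ "+".toList ++ x.toList ++ ")".toList = "*nvira+".toList ++ x.toList ++ ")".toList := by simp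
lemma pvSeg_nvirb (x : String) : "*".toList ++ "nvirb".toList ++ "+".toList ++ x.toList ++ ")".toList = "*nvirb+".toList ++ x.toList ++ ")".toList := by simp

-- ===== VERDICT (by name: the statement is the Claim_ definition above) =====
theorem idx_string_spec : Claim_equal_idx_string := by
  intro ia aa ib ab _ hpre
  obtain ⟨hne, ha, hb⟩ := hpre
  show idx_string ia aa ib ab = idx_string_alt ia aa ib ab
  unfold idx_string idx_string_alt
  simp only [PySem.List.len_eq, PySem.List.slice_from_one, PySem.List.slice_to_natCast]
  rw [pvWrapFold]
  rcases Nat.eq_zero_or_pos ia.length with h0 | hpos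
  · have hb0 : ib ≠ [] := by
      rcases hne with h | h
      · exact absurd (List.length_eq_zero_iff.1 h0) h
      · exact h
    have hbpos : 0 < ib.length := List.length_pos_iff.2 hb0
    rw [if_neg (by simp [h0]), pvFoldA_drop ib, pvFoldA_take aa ia.length ha,
        pvFoldA_take ab ib.length hb]
    refine congrArg String.ofList ?_
    simp only [h0, lt_self_iff_false, if_false, List.take_zero, List.flatMap_append,
      List.flatMap_map, pvSeg_noccb, pvSeg_nvira, pvSeg_nvirb, List.flatMap_nil,
      List.length_append, List.length_map, List.length_tail, List.length_nil, List.length_take,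
      List.drop_one, Nat.min_eq_left hb, List.append_nil, Nat.cast_zero]
    have hc : (2 * ((0:Int) + ↑ib.length) - 1).toNat = ib.length - 1 + 0 + ib.length := by omega
    rw [hc]
    by_cases h4 : ib.length = 4
    · rw [if_pos (by exact_mod_cast (by omega : 0 + ib.length = 4)), if_pos (by omega)]
      simp [List.append_assoc]
    · rw [if_neg (by exact_mod_cast (show ¬((0:Int) + ↑ib.length = 4) by exact_mod_cast (by omega : ¬(0 + ib.length = 4)))), if_neg (by omega)]
      simp [List.append_assoc]
  · rw [if_pos (by exact_mod_cast hpos), if_pos hpos]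
    rw [pvFoldA_drop ia, pvFoldA_take ib ib.length le_rfl, pvFoldA_take aa ia.length ha,
        pvFoldA_take ab ib.length hb]
    refine congrArg String.ofList ?_
    simp only [List.flatMap_append, List.flatMap_map, pvSeg_nocca, pvSeg_noccb, pvSeg_nvira,
      pvSeg_nvirb, List.take_length, List.length_append, List.length_map, List.length_tail,
      List.length_take, List.drop_one, Nat.min_eq_left ha, Nat.min_eq_left hb]
    have hc : (2 * ((ia.length : Int) + ib.length) - 1).toNat
        = ia.length - 1 + ib.length + (ia.length + ib.length) := by omega
    rw [hc]
    by_cases h4 : ia.length + ib.length = 4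
    · rw [if_pos (by exact_mod_cast h4), if_pos h4]
      simp [List.append_assoc]
      omega
    · rw [if_neg (by exact_mod_cast h4), if_neg h4]
      simp [List.append_assoc]
      omega
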